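-- pv_equiv track=rewrite | github.com/Mihirgo25/chakravyuhlocal | src/services/ftl_freight_rate/interactions/get_ftl_freight_rate_min_max_validity_dates.py | get_result_from_batch
-- ===== SOURCE A (Python) =====
-- def get_result_from_batch(result, batch_data):
--     for row in batch_data:
--         if row['validity_end'] != None:
--             row['validity_end'] = str(row['validity_end'])[:10]
--             result['min_validity_end_date'] = (min(result['min_validity_end_date'], row['validity_end'])
--                                         if result['min_validity_end_date'] != None else row['validity_end'])
--             result['max_validity_end_date'] = (max(result['max_validity_end_date'], row['validity_end'])
--                                         if result['max_validity_end_date'] != None else row['validity_end'])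
--     return result
-- ===== SOURCE B (Python) =====
-- def get_result_from_batch(result, batch_data):
--     ends = []
--     for row in batch_data:
--         if row['validity_end'] is not None:
--             row['validity_end'] = str(row['validity_end'])[:10]
--             ends.append(row['validity_end'])
--     if ends:
--         old_min = result['min_validity_end_date']
--         old_max = result['max_validity_end_date']
--         result['min_validity_end_date'] = min(ends + ([old_min] if old_min is not None else []))
--         result['max_validity_end_date'] = max(ends + ([old_max] if old_max is not None else []))
--     return result
-- ===== Notes on version B (the rewrite author's own statement) =====
-- stated objective: alternative
-- what changed: B separates the work into a collect phase (one pass appending each truncated non-None validity_end to a local list, mutating the rows) and a reduce phase (a single min/max over that list plus the pre-existing result value when non-None), instead of threading running min/max through the loop with inline None checks.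
import Mathlib
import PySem

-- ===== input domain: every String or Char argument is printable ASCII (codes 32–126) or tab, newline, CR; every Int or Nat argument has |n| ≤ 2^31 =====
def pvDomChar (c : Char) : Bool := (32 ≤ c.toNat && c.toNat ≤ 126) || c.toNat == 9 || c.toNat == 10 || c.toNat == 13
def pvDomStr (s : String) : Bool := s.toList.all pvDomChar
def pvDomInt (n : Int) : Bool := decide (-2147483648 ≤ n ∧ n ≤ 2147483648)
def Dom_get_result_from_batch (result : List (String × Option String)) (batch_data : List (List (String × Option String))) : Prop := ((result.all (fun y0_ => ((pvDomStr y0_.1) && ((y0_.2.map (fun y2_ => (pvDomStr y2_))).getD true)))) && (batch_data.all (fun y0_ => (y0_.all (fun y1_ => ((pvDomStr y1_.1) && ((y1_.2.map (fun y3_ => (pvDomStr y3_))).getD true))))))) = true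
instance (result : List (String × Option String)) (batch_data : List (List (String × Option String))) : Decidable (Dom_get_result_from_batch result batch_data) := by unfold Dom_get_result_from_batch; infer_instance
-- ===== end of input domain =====

-- ===== PORT A =====
-- B differs from A only in decomposition of the same O(n) work; the Python functions also
-- mutate `result` and the rows of `batch_data` in place identically — the equivalence proved
-- here is about the RETURN value.
-- str(x)[:10] for a string x
def pvTrunc (s : String) : String := String.ofList (PySem.List.slice s.toList none (some 10))

-- loop body of A: row['validity_end'] handling plus the two running min/max updates
def pvStepA (d : PySem.Dict String (Option String)) (row : List (String × Option String)) :
    PySem.Dict String (Option String) :=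
  match (PySem.Dict.mk row).getD "validity_end" none with
  | none => d
  | some v =>
    let ve : String := pvTrunc v
    let d1 := d.insert "min_validity_end_date"
      (some (match d.getD "min_validity_end_date" none with
             | some m => if ve < m then ve else m
             | none => ve))
    let d2 := d1.insert "max_validity_end_date"
      (some (match d1.getD "max_validity_end_date" none with
             | some m => if m < ve then ve else m
             | none => ve))
    d2

def get_result_from_batch (result : List (String × Option String)) (batch_data : List (List (String × Option String))) : List (String × Option String) :=
  (batch_data.foldl pvStepA (PySem.Dict.mk result)).items

-- ===== PORT B =====
-- the truncated validity_end of a row, none when absent/None (B's collect phase per row)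
def pvVal (row : List (String × Option String)) : Option String :=
  ((PySem.Dict.mk row).getD "validity_end" none).map pvTrunc

def get_result_from_batch_alt (result : List (String × Option String)) (batch_data : List (List (String × Option String))) : List (String × Option String) :=
  let ends := batch_data.filterMap pvVal
  match ends with
  | [] => result
  | e :: es =>
    let oldMin := (PySem.Dict.mk result).getD "min_validity_end_date" none
    let oldMax := (PySem.Dict.mk result).getD "max_validity_end_date" none
    let newMin := (PySem.List.min? ((e :: es) ++ (match oldMin with | some m => [m] | none => ([] : List String))) (fun x => x)).getD e
    let newMax := (PySem.List.max? ((e :: es) ++ (match oldMax with | some m => [m] | none => ([] : List String))) (fun x => x)).getD e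
    (((PySem.Dict.mk result).insert "min_validity_end_date" (some newMin)).insert "max_validity_end_date" (some newMax)).items

-- ===== PRECONDITION & SPEC =====
-- Pre_ excludes exactly the KeyError inputs of the Python: a row without a 'validity_end' key,
-- and, when some row carries a non-None validity_end, a result lacking one of the two date keys.
def Pre_get_result_from_batch (result : List (String × Option String)) (batch_data : List (List (String × Option String))) : Prop :=
  (∀ row ∈ batch_data, (PySem.Dict.mk row).contains "validity_end" = true) ∧
  ((∃ row ∈ batch_data, ((PySem.Dict.mk row).getD "validity_end" none).isSome = true) →
    (PySem.Dict.mk result).contains "min_validity_end_date" = true ∧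
    (PySem.Dict.mk result).contains "max_validity_end_date" = true)
instance (result : List (String × Option String)) (batch_data : List (List (String × Option String))) : Decidable (Pre_get_result_from_batch result batch_data) := by unfold Pre_get_result_from_batch; infer_instance

def pvWitness_get_result_from_batch : (List (String × Option String)) × (List (List (String × Option String))) :=
  ([("min_validity_end_date", none), ("max_validity_end_date", none)],
   [[("validity_end", some "2023-01-02 00:00:00")], [("validity_end", none)]])

def Spec_get_result_from_batch (result : List (String × Option String)) (batch_data : List (List (String × Option String))) (out : List (String × Option String)) : Prop := out = get_result_from_batch_alt result batch_data
instance (result : List (String × Option String)) (batch_data : List (List (String × Option String))) (out : List (String × Option String)) : Decidable (Spec_get_result_from_batch result batch_data out) := by unfold Spec_get_result_from_batch; infer_instance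

-- ===== CLAIM (what is proved, stated in full; the proofs are below) =====
def Claim_equal_get_result_from_batch : Prop := ∀ (result : List (String × Option String)) (batch_data : List (List (String × Option String))), Dom_get_result_from_batch result batch_data → Pre_get_result_from_batch result batch_data → Spec_get_result_from_batch result batch_data (get_result_from_batch result batch_data)

-- ===== LEMMAS AND PROOFS =====

theorem pv_if_lt_eq_min (a b : String) : (if a < b then a else b) = min a b := by
  rcases lt_trichotomy a b with h|h|h
  · simp [h.le, h]
  · simp [h]
  · simp [h.not_gt, le_of_lt h]

theorem pv_if_lt_eq_max (a b : String) : (if a < b then b else a) = max a b := by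
  rcases lt_trichotomy a b with h|h|h
  · simp [h.le, h]
  · simp [h]
  · simp [h.not_gt, le_of_lt h]

theorem pv_foldl_min_pull (l : List String) (a b : String) :
    l.foldl min (min a b) = min a (l.foldl min b) := by
  induction l generalizing b with
  | nil => rfl
  | cons c t ih => simp only [List.foldl_cons, min_assoc, ih]

theorem pv_foldl_max_pull (l : List String) (a b : String) :
    l.foldl max (max a b) = max a (l.foldl max b) := by
  induction l generalizing b with
  | nil => rfl
  | cons c t ih => simp only [List.foldl_cons, max_assoc, ih]

theorem pv_mapK_mapK_ne {κ ν : Type} [BEq κ] [LawfulBEq κ] {k k' : κ} (h : k' ≠ k) (a : ν) (b : ν)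
    (l : List (κ × ν)) :
    (l.map (fun p => if p.1 == k' then (k', b) else p)).map (fun p => if p.1 == k then (k, a) else p)
      = (l.map (fun p => if p.1 == k then (k, a) else p)).map (fun p => if p.1 == k' then (k', b) else p) := by
  induction l with
  | nil => rfl
  | cons p t ih =>
    simp only [List.map_cons, ih]
    by_cases h1 : p.1 = k <;> by_cases h2 : p.1 = k' <;>
      simp_all [beq_iff_eq]

theorem pv_mapK_mapK_self {κ ν : Type} [BEq κ] [LawfulBEq κ] (k : κ) (a b : ν) (l : List (κ × ν)) :
    (l.map (fun p => if p.1 == k then (k, b) else p)).map (fun p => if p.1 == k then (k, a) else p)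
      = l.map (fun p => if p.1 == k then (k, a) else p) := by
  induction l with
  | nil => rfl
  | cons p t ih =>
    simp only [List.map_cons, ih]
    by_cases h1 : p.1 = k <;> simp_all [beq_iff_eq]

theorem pv_mapK_of_not_contains {κ ν : Type} [BEq κ] [LawfulBEq κ] {k : κ} (a : ν)
    {l : List (κ × ν)} (h : (PySem.Dict.mk l).contains k = false) :
    l.map (fun p => if p.1 == k then (k, a) else p) = l := by
  induction l with
  | nil => rfl
  | cons p t ih =>
    simp_all [PySem.Dict.contains, List.any_cons]
    exact ih h.2

theorem pv_contains_mapK {κ ν : Type} [BEq κ] [LawfulBEq κ] (k k' : κ) (a : ν) (l : List (κ × ν)) :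
    (PySem.Dict.mk (l.map (fun p => if p.1 == k then (k, a) else p))).contains k'
      = (PySem.Dict.mk l).contains k' := by
  induction l with
  | nil => rfl
  | cons p t ih =>
    simp only [PySem.Dict.contains, List.map_cons, List.any_cons] at *
    by_cases h1 : p.1 = k <;> simp_all [beq_iff_eq]

theorem pv_insert_right_comm {κ ν : Type} [BEq κ] [LawfulBEq κ] (d : PySem.Dict κ ν) {k k' : κ}
    (h : k' ≠ k) (a b a' : ν) :
    ((d.insert k a).insert k' b).insert k a' = (d.insert k a').insert k' b := by
  apply PySem.Dict.ext
  have hk1 : (d.insert k a).contains k' = d.contains k' := by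
    rw [PySem.Dict.contains_insert]; simp [h]
  have hk1' : (d.insert k a').contains k' = d.contains k' := by
    rw [PySem.Dict.contains_insert]; simp [h]
  have hk2 : ((d.insert k a).insert k' b).contains k = true := by
    rw [PySem.Dict.contains_insert]
    simp [PySem.Dict.contains_insert_self]
  cases hck : d.contains k <;> cases hck' : d.contains k'
  · -- both absent
    rw [PySem.Dict.items_insert_of_contains _ _ hk2,
        PySem.Dict.items_insert_of_not_contains _ _ (hk1.trans hck'),
        PySem.Dict.items_insert_of_not_contains _ _ hck,
        PySem.Dict.items_insert_of_not_contains _ _ (hk1'.trans hck'),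
        PySem.Dict.items_insert_of_not_contains _ _ hck]
    simp only [List.map_append, List.map_cons, List.map_nil, List.append_assoc]
    rw [pv_mapK_of_not_contains _ hck]
    simp [beq_iff_eq, h]
  · -- k absent, k' present
    rw [PySem.Dict.items_insert_of_contains _ _ hk2,
        PySem.Dict.items_insert_of_contains _ _ (hk1.trans hck'),
        PySem.Dict.items_insert_of_not_contains _ _ hck,
        PySem.Dict.items_insert_of_contains _ _ (hk1'.trans hck'),
        PySem.Dict.items_insert_of_not_contains _ _ hck]
    simp only [List.map_append, List.map_cons, List.map_nil]
    have hnc : (PySem.Dict.mk (d.items.map (fun p => if p.1 == k' then (k', b) else p))).contains k = false := by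
      rw [pv_contains_mapK]; exact hck
    rw [pv_mapK_of_not_contains _ hnc]
    simp [beq_iff_eq, Ne.symm h]
  · -- k present, k' absent
    rw [PySem.Dict.items_insert_of_contains _ _ hk2,
        PySem.Dict.items_insert_of_not_contains _ _ (hk1.trans hck'),
        PySem.Dict.items_insert_of_contains _ _ hck,
        PySem.Dict.items_insert_of_not_contains _ _ (hk1'.trans hck'),
        PySem.Dict.items_insert_of_contains _ _ hck]
    simp only [List.map_append, List.map_cons, List.map_nil]
    rw [pv_mapK_mapK_self]
    simp [beq_iff_eq, h]
  · -- both present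
    rw [PySem.Dict.items_insert_of_contains _ _ hk2,
        PySem.Dict.items_insert_of_contains _ _ (hk1.trans hck'),
        PySem.Dict.items_insert_of_contains _ _ hck,
        PySem.Dict.items_insert_of_contains _ _ (hk1'.trans hck'),
        PySem.Dict.items_insert_of_contains _ _ hck]
    rw [pv_mapK_mapK_ne h, pv_mapK_mapK_self]

-- B's reduce phase applied to a dict and an already-collected list of truncated dates
def pvCore (d : PySem.Dict String (Option String)) (ends : List String) : List (String × Option String) :=
  match ends with
  | [] => d.items
  | e :: es =>
    let oldMin := d.getD "min_validity_end_date" none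
    let oldMax := d.getD "max_validity_end_date" none
    let newMin := (PySem.List.min? ((e :: es) ++ (match oldMin with | some m => [m] | none => ([] : List String))) (fun x => x)).getD e
    let newMax := (PySem.List.max? ((e :: es) ++ (match oldMax with | some m => [m] | none => ([] : List String))) (fun x => x)).getD e
    ((d.insert "min_validity_end_date" (some newMin)).insert "max_validity_end_date" (some newMax)).items

theorem pv_alt_eq_core (d : PySem.Dict String (Option String)) (rows : List (List (String × Option String))) :
    get_result_from_batch_alt d.items rows = pvCore d (rows.filterMap pvVal) := rfl

theorem pv_core_step (d : PySem.Dict String (Option String)) (ve : String) (l : List String) :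
    pvCore ((d.insert "min_validity_end_date"
        (some (match d.getD "min_validity_end_date" none with
               | some m => if ve < m then ve else m
               | none => ve))).insert "max_validity_end_date"
        (some (match d.getD "max_validity_end_date" none with
               | some m => if m < ve then ve else m
               | none => ve))) l
      = pvCore d (ve :: l) := by
  have hne : ("max_validity_end_date" : String) ≠ "min_validity_end_date" := by decide
  have hne' : ("min_validity_end_date" : String) ≠ "max_validity_end_date" := by decide
  cases l with
  | nil =>
    simp only [pvCore]
    cases o1 : d.getD "min_validity_end_date" none <;>
      cases o2 : d.getD "max_validity_end_date" none <;>
        · simp only [List.cons_append, List.nil_append, PySem.List.min?_id_cons,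
            PySem.List.max?_id_cons, Option.getD_some, List.foldl_cons, List.foldl_nil,
            pv_if_lt_eq_min, pv_if_lt_eq_max]
          try simp [max_comm]
  | cons f fs =>
    simp only [pvCore, PySem.Dict.getD_insert_of_ne _ _ _ hne', PySem.Dict.getD_insert_self]
    rw [pv_insert_right_comm d hne, PySem.Dict.insert_insert_self]
    cases o1 : d.getD "min_validity_end_date" none <;>
      cases o2 : d.getD "max_validity_end_date" none <;>
        · simp only [List.cons_append, PySem.List.min?_id_cons,
            PySem.List.max?_id_cons, Option.getD_some, List.foldl_cons, List.foldl_nil,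
            List.foldl_append, pv_if_lt_eq_min, pv_if_lt_eq_max, pv_foldl_min_pull,
            pv_foldl_max_pull]
          simp [min_comm, min_left_comm, max_comm, max_left_comm]

theorem pv_step_eq (d : PySem.Dict String (Option String)) (row : List (String × Option String)) (v : String)
    (hv : (PySem.Dict.mk row).getD "validity_end" none = some v) :
    pvStepA d row = (d.insert "min_validity_end_date"
        (some (match d.getD "min_validity_end_date" none with
               | some m => if pvTrunc v < m then pvTrunc v else m
               | none => pvTrunc v))).insert "max_validity_end_date"
        (some (match d.getD "max_validity_end_date" none with
               | some m => if m < pvTrunc v then pvTrunc v else m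
               | none => pvTrunc v)) := by
  unfold pvStepA
  rw [hv]
  simp only [PySem.Dict.getD_insert_of_ne _ _ _
    (by decide : ("max_validity_end_date" : String) ≠ "min_validity_end_date")]

theorem pv_loop_eq (rows : List (List (String × Option String)))
    (d : PySem.Dict String (Option String)) :
    (rows.foldl pvStepA d).items = get_result_from_batch_alt d.items rows := by
  rw [pv_alt_eq_core]
  induction rows generalizing d with
  | nil => rfl
  | cons row rows ih =>
    rw [List.foldl_cons, List.filterMap_cons, ih]
    cases hv : (PySem.Dict.mk row).getD "validity_end" none with
    | none => simp [pvStepA, hv, pvVal]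
    | some v =>
      rw [pv_step_eq d row v hv, pv_core_step]
      simp [pvVal, hv]


-- ===== VERDICT (by name: the statement is the Claim_ definition above) =====
theorem get_result_from_batch_spec : Claim_equal_get_result_from_batch := by
  intro result batch_data _ _
  unfold Spec_get_result_from_batch get_result_from_batch
  exact pv_loop_eq batch_data (PySem.Dict.mk result)
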